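-- pv_equiv track=rewrite | github.com/ZrjaK/algorithm | OJ/leetcode/2281.巫师的总力量和.py | totalStrength
-- ===== SOURCE A (Python) =====
-- from typing import List
--
-- def totalStrength(strength: List[int]) -> int:
--     MOD = 10 ** 9 + 7
--
--     n = len(strength)
--     left, st = [-1] * n, []  # left[i] 为左侧严格小于 strength[i] 的最近元素位置（不存在时为 -1）
--     for i, v in enumerate(strength):
--         while st and strength[st[-1]] >= v: st.pop()
--         if st: left[i] = st[-1]
--         st.append(i)
--
--     right, st = [n] * n, []  # right[i] 为右侧小于等于 strength[i] 的最近元素位置（不存在时为 n）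
--     for i in range(n - 1, -1, -1):
--         while st and strength[st[-1]] > strength[i]: st.pop()
--         if st: right[i] = st[-1]
--         st.append(i)
--
--     s = [0] * (n + 1)  # 前缀和
--     for i, v in enumerate(strength):
--         s[i + 1] = (s[i] + v) % MOD
--     ss = [0] * (n + 2)  # 前缀和的前缀和
--     for i, v in enumerate(s):
--         ss[i + 1] = (ss[i] + v) % MOD
--
--     ans = 0
--     for i, v in enumerate(strength):
--         l, r = left[i] + 1, right[i] - 1  # [l, r]  左闭右闭
--         res = ((i - l + 1) * (ss[r + 2] - ss[i + 1]) - (r - i + 1) * (ss[i + 1] - ss[l])) % MOD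
--         ans = (ans + res * v) % MOD  # 累加贡献
--     return ans
-- ===== SOURCE B (Python) =====
-- def totalStrength(strength):
--     MOD = 10 ** 9 + 7
--     n = len(strength)
--     # ss[k] = sum of the first k exact prefix sums (ss has length n+2)
--     ss = [0, 0]
--     acc = 0
--     for v in strength:
--         acc += v
--         ss.append(ss[-1] + acc)
--     total = 0
--     for i, v in enumerate(strength):
--         j = i - 1
--         while j >= 0 and strength[j] >= v:
--             j -= 1
--         l = j + 1
--         k = i + 1
--         while k < n and strength[k] > v:
--             k += 1
--         r = k - 1
--         total += v * ((i - l + 1) * (ss[r + 2] - ss[i + 1]) - (r - i + 1) * (ss[i + 1] - ss[l]))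
--     return total % MOD
-- ===== Notes on version B (the rewrite author's own statement) =====
-- stated objective: simpler
-- what changed: Replaces the two monotonic-stack passes and the three modular prefix-sum arrays by direct per-index boundary scans (nearest strictly-smaller on the left, nearest less-or-equal on the right) over one exact prefix-of-prefix-sums array, accumulating exactly and reducing mod 1e9+7 once at the end.
import Mathlib
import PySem

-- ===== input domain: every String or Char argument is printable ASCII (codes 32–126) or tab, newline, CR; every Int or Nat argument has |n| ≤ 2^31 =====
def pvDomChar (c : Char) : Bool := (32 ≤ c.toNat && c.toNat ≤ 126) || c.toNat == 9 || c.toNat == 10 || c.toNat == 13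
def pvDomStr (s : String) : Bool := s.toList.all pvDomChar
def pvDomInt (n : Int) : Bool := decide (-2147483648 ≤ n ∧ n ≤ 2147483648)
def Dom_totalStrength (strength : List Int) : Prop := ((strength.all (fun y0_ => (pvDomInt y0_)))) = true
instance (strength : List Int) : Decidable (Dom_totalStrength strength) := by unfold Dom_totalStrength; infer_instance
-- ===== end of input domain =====

-- B replaces A's two monotonic-stack passes and modular prefix arrays by direct per-index
-- boundary scans over one exact prefix-of-prefix-sums list, reducing mod 1e9+7 once (simpler).

-- ===== PORT A =====
-- stack entries are always valid indices of `strength`, so Python's `strength[st[-1]]` never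
-- raises there and `getD _ 0` is exact; the stack list's head is Python's `st[-1]`.
def pvPopGe (a : List Int) (v : Int) : List Nat → List Nat
  | [] => []
  | j :: st => if a.getD j 0 ≥ v then pvPopGe a v st else j :: st

def pvPopGt (a : List Int) (v : Int) : List Nat → List Nat
  | [] => []
  | j :: st => if a.getD j 0 > v then pvPopGt a v st else j :: st

def totalStrength (strength : List Int) : Int :=
  let M : Int := 10 ^ 9 + 7
  let n := strength.length
  -- left pass: for i, v in enumerate(strength)
  let lp := (List.range n).foldl (fun (p : List Int × List Nat) i =>
      let v := strength.getD i 0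
      let st := pvPopGe strength v p.2
      let left := st.head?.elim p.1 (fun j => p.1.set i (Int.ofNat j))
      (left, i :: st)) (List.replicate n (-1), [])
  let left := lp.1
  -- right pass: for i in range(n - 1, -1, -1); loop indices are in [0, n) so `.toNat` is exact
  let rp := (PySem.List.pyRange ((n : Int) - 1) (-1) (-1)).foldl (fun (p : List Int × List Nat) ii =>
      let i := ii.toNat
      let v := strength.getD i 0
      let st := pvPopGt strength v p.2
      let right := st.head?.elim p.1 (fun j => p.1.set i (Int.ofNat j))
      (right, i :: st)) (List.replicate n (n : Int), [])
  let right := rp.1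
  -- s: prefix sums mod M, built by assignment into a zero array
  let s := (List.range n).foldl (fun (s : List Int) i =>
      s.set (i + 1) (PySem.Int.mod (s.getD i 0 + strength.getD i 0) M)) (List.replicate (n + 1) 0)
  -- ss: prefix sums of s mod M
  let ss := (List.range (n + 1)).foldl (fun (ss : List Int) i =>
      ss.set (i + 1) (PySem.Int.mod (ss.getD i 0 + s.getD i 0) M)) (List.replicate (n + 2) 0)
  -- final accumulation; all ss indices are in [0, n+1] so `.toNat` indexing is exact
  (List.range n).foldl (fun ans i =>
      let v := strength.getD i 0
      let l := left.getD i 0 + 1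
      let r := right.getD i 0 - 1
      let res := PySem.Int.mod (((i : Int) - l + 1) * (ss.getD (r + 2).toNat 0 - ss.getD (i + 1) 0)
                 - (r - (i : Int) + 1) * (ss.getD (i + 1) 0 - ss.getD l.toNat 0)) M
      PySem.Int.mod (ans + res * v) M) 0

-- ===== PORT B =====
-- while j >= 0 and strength[j] >= v: j -= 1   (returns the final j; list indexing is in range)
def pvScanL (a : List Int) (v : Int) : Nat → Int
  | 0 => if a.getD 0 0 ≥ v then -1 else 0
  | j + 1 => if a.getD (j + 1) 0 ≥ v then pvScanL a v j else ((j + 1 : Nat) : Int)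

-- while k < n and strength[k] > v: k += 1   (returns the final k)
def pvScanR (a : List Int) (v : Int) (k : Nat) : Nat :=
  if k < a.length then
    if a.getD k 0 > v then pvScanR a v (k + 1) else k
  else k
termination_by a.length - k
decreasing_by omega

def totalStrength_alt (strength : List Int) : Int :=
  let M : Int := 10 ^ 9 + 7
  let n := strength.length
  -- ss[k] = sum of the first k exact prefix sums, built by appending
  let p := strength.foldl (fun (p : List Int × Int) v =>
      let acc := p.2 + v
      (p.1 ++ [p.1.getLastD 0 + acc], acc)) ([0, 0], 0)
  let ss := p.1
  let total := (List.range n).foldl (fun total i =>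
      let v := strength.getD i 0
      let j : Int := if i = 0 then -1 else pvScanL strength v (i - 1)
      let l := j + 1
      let r : Int := (pvScanR strength v (i + 1) : Int) - 1
      total + v * (((i : Int) - l + 1) * (ss.getD (r + 2).toNat 0 - ss.getD (i + 1) 0)
                 - (r - (i : Int) + 1) * (ss.getD (i + 1) 0 - ss.getD l.toNat 0))) 0
  PySem.Int.mod total M

-- ===== PRECONDITION & SPEC =====
def Spec_totalStrength (strength : List Int) (out : Int) : Prop := out = totalStrength_alt strength
instance (strength : List Int) (out : Int) : Decidable (Spec_totalStrength strength out) := by unfold Spec_totalStrength; infer_instance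

-- ===== CLAIM (what is proved, stated in full; the proofs are below) =====
def Claim_equal_totalStrength : Prop := ∀ (strength : List Int), Dom_totalStrength strength → Spec_totalStrength strength (totalStrength strength)

-- ===== LEMMAS AND PROOFS =====

def pvM : Int := 10 ^ 9 + 7

theorem pvM_pos : (0 : Int) < pvM := by norm_num [pvM]

-- nearest strictly-smaller index on the left (as an Option), its Int form, and the
-- nearest less-or-equal index on the right, as B's scans compute them
def pvSpecLL (a : List Int) (i : Nat) : Option Nat :=
  ((List.range i).filter (fun j => decide (a.getD j 0 < a.getD i 0))).getLast?

def pvSpecL (a : List Int) (i : Nat) : Int := ((pvSpecLL a i).map Int.ofNat).getD (-1)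

def pvSpecR (a : List Int) (i : Nat) : Nat :=
  ((List.range' (i + 1) (a.length - (i + 1))).find? (fun k => decide (a.getD k 0 ≤ a.getD i 0))).getD a.length

-- survival predicates of A's two stacks, the stacks, and the partially-filled arrays
def pvPL (a : List Int) (i j : Nat) : Bool := decide (∀ k < i, j < k → a.getD j 0 < a.getD k 0)

def pvStkL (a : List Int) (i : Nat) : List Nat := ((List.range i).filter (pvPL a i)).reverse

def pvLeftArr (a : List Int) (i : Nat) : List Int :=
  (List.range a.length).map (fun t => if t < i then pvSpecL a t else -1)

def pvQR (a : List Int) (i j : Nat) : Bool := decide (∀ k < j, i ≤ k → a.getD j 0 ≤ a.getD k 0)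

def pvStkR (a : List Int) (i : Nat) : List Nat := (List.range' i (a.length - i)).filter (pvQR a i)

def pvRightArr (a : List Int) (i : Nat) : List Int :=
  (List.range a.length).map (fun t => if i ≤ t then ((pvSpecR a t : Nat) : Int) else (a.length : Int))

-- exact and modular prefix sums and prefix-of-prefix sums
def pvSx (a : List Int) : Nat → Int
  | 0 => 0
  | k + 1 => pvSx a k + a.getD k 0

def pvSSx (a : List Int) : Nat → Int
  | 0 => 0
  | k + 1 => pvSSx a k + pvSx a k

def pvSm (a : List Int) : Nat → Int
  | 0 => 0
  | k + 1 => PySem.Int.mod (pvSm a k + a.getD k 0) pvM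

def pvSSm (a : List Int) : Nat → Int
  | 0 => 0
  | k + 1 => PySem.Int.mod (pvSSm a k + pvSm a k) pvM

-- the shared per-index contribution expression, over an abstract ss-function
def pvE (a : List Int) (ss : Nat → Int) (i : Nat) : Int :=
  ((i : Int) - (pvSpecL a i + 1) + 1) *
      (ss (((pvSpecR a i : Int) - 1) + 2).toNat - ss (i + 1)) -
    (((pvSpecR a i : Int) - 1) - (i : Int) + 1) * (ss (i + 1) - ss (pvSpecL a i + 1).toNat)

-- generic helpers ------------------------------------------------------------

theorem pvSetMap {α : Type} (f : Nat → α) (n i : Nat) (x : α) (_h : i < n) :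
    ((List.range n).map f).set i x = (List.range n).map (fun t => if t = i then x else f t) := by
  refine List.ext_getElem (by simp) ?_
  intro k h1 h2
  simp only [List.getElem_set, List.getElem_map, List.getElem_range]
  rcases eq_or_ne i k with h | h
  · simp [h]
  · simp [h, Ne.symm h]

theorem pvSumModEq (l : List Nat) (f g : Nat → Int)
    (h : ∀ x ∈ l, f x ≡ g x [ZMOD pvM]) : (l.map f).sum ≡ (l.map g).sum [ZMOD pvM] := by
  induction l with
  | nil => rfl
  | cons x l ih =>
    simp only [List.map_cons, List.sum_cons]
    exact (h x (by simp)).add (ih (fun y hy => h y (by simp [hy])))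

theorem pvFoldlMod (g : Nat → Int) (n : Nat) :
    (List.range n).foldl (fun ans i => PySem.Int.mod (ans + g i) pvM) 0 =
      PySem.Int.mod ((List.range n).map g).sum pvM := by
  induction n with
  | zero =>
    simp [PySem.Int.mod_eq_emod_of_pos pvM_pos]
  | succ n ih =>
    rw [List.range_succ, List.foldl_append, List.map_append, ih]
    simp only [List.foldl_cons, List.foldl_nil, List.map_cons, List.map_nil, List.sum_append,
      List.sum_cons, List.sum_nil]
    rw [PySem.Int.mod_eq_emod_of_pos pvM_pos, PySem.Int.mod_eq_emod_of_pos pvM_pos,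
      PySem.Int.mod_eq_emod_of_pos pvM_pos, Int.emod_add_emod]
    ring_nf

-- stack pops -----------------------------------------------------------------

theorem pvPopGe_filter (a : List Int) (v : Int) :
    ∀ l : List Nat, l.Pairwise (fun x y => a.getD y 0 < a.getD x 0) →
      pvPopGe a v l = l.filter (fun j => decide (a.getD j 0 < v)) := by
  intro l hp
  induction l with
  | nil => rfl
  | cons j l ih =>
    rcases List.pairwise_cons.mp hp with ⟨hj, hl⟩
    simp only [pvPopGe, List.filter_cons]
    by_cases h : a.getD j 0 ≥ v
    · rw [if_pos h, ih hl, if_neg (by simp only [decide_eq_true_eq]; exact not_lt.mpr h)]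
    · rw [if_neg h]
      have hjv : a.getD j 0 < v := lt_of_not_ge h
      rw [if_pos (by simp only [decide_eq_true_eq]; exact hjv)]
      rw [List.filter_eq_self.mpr]
      intro y hy
      simp only [decide_eq_true_eq]
      exact lt_trans (hj y hy) hjv

theorem pvPopGt_filter (a : List Int) (v : Int) :
    ∀ l : List Nat, l.Pairwise (fun x y => a.getD y 0 ≤ a.getD x 0) →
      pvPopGt a v l = l.filter (fun j => decide (a.getD j 0 ≤ v)) := by
  intro l hp
  induction l with
  | nil => rfl
  | cons j l ih =>
    rcases List.pairwise_cons.mp hp with ⟨hj, hl⟩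
    simp only [pvPopGt, List.filter_cons]
    by_cases h : a.getD j 0 > v
    · rw [if_pos h, ih hl, if_neg (by simp only [decide_eq_true_eq]; exact not_le.mpr h)]
    · rw [if_neg h]
      have hjv : a.getD j 0 ≤ v := le_of_not_gt h
      rw [if_pos (by simp only [decide_eq_true_eq]; exact hjv)]
      rw [List.filter_eq_self.mpr]
      intro y hy
      simp only [decide_eq_true_eq]
      exact le_trans (hj y hy) hjv

theorem pvStkL_pairwise (a : List Int) (i : Nat) :
    (pvStkL a i).Pairwise (fun x y => a.getD y 0 < a.getD x 0) := by
  unfold pvStkL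
  rw [List.pairwise_reverse]
  have h1 : ((List.range i).filter (pvPL a i)).Pairwise (· < ·) :=
    List.pairwise_lt_range.sublist List.filter_sublist
  refine h1.imp_of_mem ?_
  intro x y hx hy hlt
  have hpx := (List.mem_filter.mp hx).2
  have hyr := (List.mem_filter.mp hy).1
  simp only [pvPL, decide_eq_true_eq] at hpx
  exact hpx y (List.mem_range.mp hyr) hlt

theorem pvStkR_pairwise (a : List Int) (i : Nat) :
    (pvStkR a i).Pairwise (fun x y => a.getD y 0 ≤ a.getD x 0) := by
  unfold pvStkR
  have h1 : ((List.range' i (a.length - i)).filter (pvQR a i)).Pairwise (· < ·) :=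
    List.Pairwise.sublist List.filter_sublist (by
      rw [List.range'_eq_map_range]
      exact List.pairwise_map.mpr (List.pairwise_lt_range.imp (fun h => by omega)))
  refine h1.imp_of_mem ?_
  intro x y hx hy hlt
  have hpy := (List.mem_filter.mp hy).2
  have hxr := (List.mem_filter.mp hx).1
  simp only [pvQR, decide_eq_true_eq] at hpy
  exact hpy x hlt (List.mem_range'_1.mp hxr).1

theorem pvPopStepL (a : List Int) (i : Nat) :
    pvPopGe a (a.getD i 0) (pvStkL a i) = ((List.range i).filter (pvPL a (i + 1))).reverse := by
  rw [pvPopGe_filter a _ _ (pvStkL_pairwise a i)]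
  unfold pvStkL
  rw [List.filter_reverse, List.filter_filter]
  congr 1
  refine List.filter_congr ?_
  intro j hj
  have hji := List.mem_range.mp hj
  simp only [pvPL, ← Bool.decide_and, decide_eq_decide]
  constructor
  · rintro ⟨h1, h2⟩ k hk hjk
    rcases Nat.lt_succ_iff_lt_or_eq.mp hk with h' | h'
    · exact h2 k h' hjk
    · subst h'; exact h1
  · intro h
    exact ⟨h i (by omega) hji, fun k hk hjk => h k (by omega) hjk⟩

theorem pvPopStepR (a : List Int) (i : Nat) (hi : i < a.length) :
    pvPopGt a (a.getD i 0) (pvStkR a (i + 1)) =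
      (List.range' (i + 1) (a.length - (i + 1))).filter (pvQR a i) := by
  rw [pvPopGt_filter a _ _ (pvStkR_pairwise a (i + 1)), pvStkR, List.filter_filter]
  refine List.filter_congr ?_
  intro j hj
  have hji := (List.mem_range'_1.mp hj).1
  simp only [pvQR, ← Bool.decide_and, decide_eq_decide]
  constructor
  · rintro ⟨h1, h2⟩ k hk hik
    rcases Nat.lt_or_ge k (i + 1) with h' | h'
    · have : k = i := by omega
      subst this; exact h1
    · exact h2 k hk h'
  · intro h
    exact ⟨h i (by omega) (by omega), fun k hk hik => h k hk (by omega)⟩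

theorem pvStkL_succ (a : List Int) (i : Nat) :
    pvStkL a (i + 1) = i :: ((List.range i).filter (pvPL a (i + 1))).reverse := by
  unfold pvStkL
  have hP : pvPL a (i + 1) i = true := by
    simp only [pvPL, decide_eq_true_eq]
    intro k hk hik
    omega
  rw [List.range_succ, List.filter_append]
  simp [hP]

theorem pvStkR_eq_cons (a : List Int) (i : Nat) (hi : i < a.length) :
    pvStkR a i = i :: (List.range' (i + 1) (a.length - (i + 1))).filter (pvQR a i) := by
  unfold pvStkR
  have h : a.length - i = (a.length - (i + 1)) + 1 := by omega
  rw [h, List.range'_succ]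
  have hQ : pvQR a i i = true := by
    simp only [pvQR, decide_eq_true_eq]
    intro k hk hik
    omega
  simp [hQ]

-- the popped stack's top is exactly the scan answer --------------------------

theorem pvLastCongr (a : List Int) (i : Nat) :
    ((List.range i).filter (pvPL a (i + 1))).getLast? = pvSpecLL a i := by
  suffices h : ∀ m, m ≤ i → (∀ k, m ≤ k → k < i → ¬(a.getD k 0 < a.getD i 0)) →
      ((List.range m).filter (pvPL a (i + 1))).getLast? =
        ((List.range m).filter (fun j => decide (a.getD j 0 < a.getD i 0))).getLast? by
    exact h i le_rfl (fun k hk hk' => by omega)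
  intro m
  induction m with
  | zero => intro _ _; rfl
  | succ m ih =>
    intro hm hyp
    rw [List.range_succ, List.filter_append, List.filter_append]
    by_cases hq : a.getD m 0 < a.getD i 0
    · have hP : pvPL a (i + 1) m = true := by
        simp only [pvPL, decide_eq_true_eq]
        intro k hk hmk
        rcases Nat.lt_succ_iff_lt_or_eq.mp hk with h' | h'
        · exact lt_of_lt_of_le hq (not_lt.mp (hyp k (by omega) h'))
        · subst h'; exact hq
      have e1 : List.filter (pvPL a (i + 1)) [m] = [m] := by
        simp only [List.filter_cons, List.filter_nil, hP]
        exact if_pos trivial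
      have e2 : List.filter (fun j => decide (a.getD j 0 < a.getD i 0)) [m] = [m] := by
        simp only [List.filter_cons, List.filter_nil, decide_eq_true hq]
        exact if_pos trivial
      rw [e1, e2, List.getLast?_concat, List.getLast?_concat]
    · have hP : pvPL a (i + 1) m = false := by
        simp only [pvPL, decide_eq_false_iff_not]
        intro hall
        exact hq (hall i (by omega) (by omega))
      have e1 : List.filter (pvPL a (i + 1)) [m] = [] := by
        simp only [List.filter_cons, List.filter_nil, hP, Bool.false_eq_true]
        exact if_neg not_false
      have e2 : List.filter (fun j => decide (a.getD j 0 < a.getD i 0)) [m] = [] := by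
        simp only [List.filter_cons, List.filter_nil, decide_eq_false hq, Bool.false_eq_true]
        exact if_neg not_false
      rw [e1, e2, List.append_nil, List.append_nil]
      exact ih (by omega) (fun k hk hk' =>
        (Nat.eq_or_lt_of_le hk).elim (fun he => he ▸ hq) (fun hlt => hyp k hlt hk'))

theorem pvFindCongr (a : List Int) (i : Nat) :
    ((List.range' (i + 1) (a.length - (i + 1))).filter (pvQR a i)).head? =
      (List.range' (i + 1) (a.length - (i + 1))).find? (fun k => decide (a.getD k 0 ≤ a.getD i 0)) := by
  rw [List.head?_filter]
  suffices h : ∀ m s, i < s → (∀ k, i < k → k < s → ¬(a.getD k 0 ≤ a.getD i 0)) →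
      (List.range' s m).find? (pvQR a i) =
        (List.range' s m).find? (fun k => decide (a.getD k 0 ≤ a.getD i 0)) by
    exact h _ (i + 1) (by omega) (fun k hk hk' => by omega)
  intro m
  induction m with
  | zero => intro _ _ _; rfl
  | succ m ih =>
    intro s hs hyp
    rw [List.range'_succ]
    by_cases hq : a.getD s 0 ≤ a.getD i 0
    · have hQ : pvQR a i s = true := by
        simp only [pvQR, decide_eq_true_eq]
        intro k hk hik
        rcases Nat.eq_or_lt_of_le hik with h' | h'
        · exact h' ▸ hq
        · exact le_trans hq (le_of_lt (lt_of_not_ge (hyp k h' hk)))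
      rw [List.find?_cons_of_pos hQ,
        List.find?_cons_of_pos (p := fun k => decide (a.getD k 0 ≤ a.getD i 0)) (decide_eq_true hq)]
    · have hQ : pvQR a i s = false := by
        simp only [pvQR, decide_eq_false_iff_not]
        intro hall
        exact hq (hall i hs (by omega))
      rw [List.find?_cons_of_neg (by rw [hQ]; exact Bool.false_ne_true),
        List.find?_cons_of_neg (p := fun k => decide (a.getD k 0 ≤ a.getD i 0))
          (by intro hc; exact hq (of_decide_eq_true hc))]
      exact ih (s + 1) (by omega) (fun k hk hk' =>
        (Nat.lt_succ_iff_lt_or_eq.mp hk').elim (fun hlt => hyp k hk hlt) (fun he => he ▸ hq))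

-- loop invariants for A ------------------------------------------------------

theorem pvLeftInv (a : List Int) : ∀ i, i ≤ a.length →
    (List.range i).foldl (fun (p : List Int × List Nat) i =>
      let v := a.getD i 0
      let st := pvPopGe a v p.2
      let left := st.head?.elim p.1 (fun j => p.1.set i (Int.ofNat j))
      (left, i :: st)) (List.replicate a.length (-1), []) = (pvLeftArr a i, pvStkL a i) := by
  intro i
  induction i with
  | zero =>
    intro _
    rw [List.range_zero, List.foldl_nil]
    have h1 : pvLeftArr a 0 = List.replicate a.length (-1 : Int) := by
      unfold pvLeftArr
      rw [List.map_congr_left (g := fun _ => (-1 : Int)) (fun t _ => by simp),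
        List.map_const', List.length_range]
    have h2 : pvStkL a 0 = [] := rfl
    rw [h1, h2]
  | succ i ih =>
    intro h
    have hi : i < a.length := by omega
    rw [List.range_succ, List.foldl_append, ih (by omega)]
    simp only [List.foldl_cons, List.foldl_nil]
    rw [pvPopStepL, List.head?_reverse, pvLastCongr, ← pvStkL_succ]
    simp only [Prod.mk.injEq]
    refine ⟨?_, trivial⟩
    rcases hLL : pvSpecLL a i with _ | j
    · simp only [Option.elim_none]
      unfold pvLeftArr
      refine List.map_congr_left ?_
      intro t _
      rcases Nat.lt_trichotomy t i with h' | h' | h'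
      · simp [h', Nat.lt_succ_of_lt h']
      · subst h'
        simp [pvSpecL, hLL]
      · have h1 : ¬ t < i := by omega
        have h2 : ¬ t < i + 1 := by omega
        simp [h1, h2]
    · simp only [Option.elim_some]
      unfold pvLeftArr
      rw [pvSetMap _ _ _ _ hi]
      refine List.map_congr_left ?_
      intro t _
      rcases eq_or_ne t i with h' | h'
      · subst h'
        simp [pvSpecL, hLL]
      · by_cases h3 : t < i
        · simp [h', h3, Nat.lt_succ_of_lt h3]
        · have h4 : ¬ t < i + 1 := by omega
          simp [h', h3, h4]

theorem pvRightInv (a : List Int) : ∀ m, m ≤ a.length →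
    ((List.range' (a.length - m) m).reverse).foldl (fun (p : List Int × List Nat) i =>
      let v := a.getD i 0
      let st := pvPopGt a v p.2
      let right := st.head?.elim p.1 (fun j => p.1.set i (Int.ofNat j))
      (right, i :: st)) (List.replicate a.length (a.length : Int), []) =
      (pvRightArr a (a.length - m), pvStkR a (a.length - m)) := by
  intro m
  induction m with
  | zero =>
    intro _
    rw [Nat.sub_zero]
    have h0 : List.range' a.length 0 = ([] : List Nat) := rfl
    rw [h0, List.reverse_nil, List.foldl_nil]
    have h1 : pvRightArr a a.length = List.replicate a.length ((a.length : Nat) : Int) := by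
      unfold pvRightArr
      rw [List.map_congr_left (g := fun _ => ((a.length : Nat) : Int))
        (fun t ht => by simp [show ¬ a.length ≤ t by have := List.mem_range.mp ht; omega]),
        List.map_const', List.length_range]
    have h2 : pvStkR a a.length = [] := by
      simp [pvStkR]
    rw [h1, h2]
  | succ m ih =>
    intro h
    have hi : a.length - (m + 1) < a.length := by omega
    set i := a.length - (m + 1) with hidef
    have h1 : a.length - m = i + 1 := by omega
    rw [List.range'_succ, List.reverse_cons, List.foldl_append]
    have ihv := ih (by omega)
    rw [h1] at ihv
    rw [ihv]
    simp only [List.foldl_cons, List.foldl_nil]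
    rw [pvPopStepR a i hi, pvFindCongr, ← pvStkR_eq_cons a i hi]
    simp only [Prod.mk.injEq]
    refine ⟨?_, trivial⟩
    have hspec : pvSpecR a i =
        ((List.range' (i + 1) (a.length - (i + 1))).find?
          (fun k => decide (a.getD k 0 ≤ a.getD i 0))).getD a.length := rfl
    rcases hF : (List.range' (i + 1) (a.length - (i + 1))).find?
        (fun k => decide (a.getD k 0 ≤ a.getD i 0)) with _ | j
    · simp only [Option.elim_none]
      unfold pvRightArr
      refine List.map_congr_left ?_
      intro t _
      by_cases h2 : i ≤ t
      · by_cases h3 : i + 1 ≤ t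
        · rw [if_pos h3, if_pos h2]
        · have h' : t = i := by omega
          rw [if_neg h3, if_pos h2, h', hspec, hF]
          rfl
      · have h3 : ¬ i + 1 ≤ t := by omega
        rw [if_neg h3, if_neg h2]
    · simp only [Option.elim_some]
      unfold pvRightArr
      rw [pvSetMap _ _ _ _ hi]
      refine List.map_congr_left ?_
      intro t _
      rcases eq_or_ne t i with h' | h'
      · rw [if_pos h', if_pos (show i ≤ t by omega), h', hspec, hF]
        rfl
      · rw [if_neg h']
        by_cases h3 : i + 1 ≤ t
        · rw [if_pos h3, if_pos (by omega : i ≤ t)]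
        · have h4 : ¬ i ≤ t := by omega
          rw [if_neg h3, if_neg h4]

theorem pvSInv (a : List Int) : ∀ i, i ≤ a.length →
    (List.range i).foldl (fun (s : List Int) i =>
        s.set (i + 1) (PySem.Int.mod (s.getD i 0 + a.getD i 0) pvM))
      (List.replicate (a.length + 1) 0) =
      (List.range (a.length + 1)).map (fun k => if k ≤ i then pvSm a k else 0) := by
  intro i
  induction i with
  | zero =>
    intro _
    rw [List.range_zero, List.foldl_nil]
    have h1 : (List.range (a.length + 1)).map (fun k => if k ≤ 0 then pvSm a k else 0) =
        List.replicate (a.length + 1) (0 : Int) := by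
      rw [List.map_congr_left (g := fun _ => (0 : Int)) ?_, List.map_const', List.length_range]
      intro k _
      rcases Nat.eq_zero_or_pos k with h | h
      · subst h; simp [pvSm]
      · simp [show ¬ k ≤ 0 by omega]
    rw [h1]
  | succ i ih =>
    intro h
    rw [List.range_succ, List.foldl_append, ih (by omega)]
    simp only [List.foldl_cons, List.foldl_nil]
    rw [PySem.List.getD_map_range _ _ _ _ (by omega), if_pos (le_refl i),
      pvSetMap _ _ _ _ (by omega)]
    refine List.map_congr_left ?_
    intro t _
    rcases eq_or_ne t (i + 1) with h' | h'
    · subst h'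
      simp [pvSm]
    · by_cases h3 : t ≤ i
      · simp [h', h3, (by omega : t ≤ i + 1)]
      · simp [h', h3, show ¬ t ≤ i + 1 by omega]

theorem pvSSInv (a : List Int) : ∀ i, i ≤ a.length + 1 →
    (List.range i).foldl (fun (ss : List Int) i =>
        ss.set (i + 1) (PySem.Int.mod (ss.getD i 0 + pvSm a i) pvM))
      (List.replicate (a.length + 2) 0) =
      (List.range (a.length + 2)).map (fun k => if k ≤ i then pvSSm a k else 0) := by
  intro i
  induction i with
  | zero =>
    intro _
    rw [List.range_zero, List.foldl_nil]
    have h1 : (List.range (a.length + 2)).map (fun k => if k ≤ 0 then pvSSm a k else 0) =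
        List.replicate (a.length + 2) (0 : Int) := by
      rw [List.map_congr_left (g := fun _ => (0 : Int)) ?_, List.map_const', List.length_range]
      intro k _
      rcases Nat.eq_zero_or_pos k with h | h
      · subst h; simp [pvSSm]
      · simp [show ¬ k ≤ 0 by omega]
    rw [h1]
  | succ i ih =>
    intro h
    rw [List.range_succ, List.foldl_append, ih (by omega)]
    simp only [List.foldl_cons, List.foldl_nil]
    rw [PySem.List.getD_map_range _ _ _ _ (by omega), if_pos (le_refl i),
      pvSetMap _ _ _ _ (by omega)]
    refine List.map_congr_left ?_
    intro t _
    rcases eq_or_ne t (i + 1) with h' | h'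
    · subst h'
      simp [pvSSm]
    · by_cases h3 : t ≤ i
      · simp [h', h3, (by omega : t ≤ i + 1)]
      · simp [h', h3, show ¬ t ≤ i + 1 by omega]

-- B's pieces -----------------------------------------------------------------

theorem pvScanL_eq (a : List Int) (v : Int) : ∀ j, pvScanL a v j =
    ((((List.range (j + 1)).filter (fun t => decide (a.getD t 0 < v))).getLast?.map Int.ofNat)).getD (-1) := by
  intro j
  induction j with
  | zero =>
    by_cases h : a.getD 0 0 ≥ v
    · have e : List.filter (fun t => decide (a.getD t 0 < v)) [0] = [] := by
        simp only [List.filter_cons, List.filter_nil, decide_eq_false (not_lt.mpr h),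
          Bool.false_eq_true]
        exact if_neg not_false
      simp only [pvScanL, if_pos h, Nat.zero_add, List.range_one, e]
      rfl
    · have e : List.filter (fun t => decide (a.getD t 0 < v)) [0] = [0] := by
        simp only [List.filter_cons, List.filter_nil, decide_eq_true (lt_of_not_ge h)]
        exact if_pos trivial
      simp only [pvScanL, if_neg h, Nat.zero_add, List.range_one, e]
      rfl
  | succ j ih =>
    rw [show j + 1 + 1 = (j + 1) + 1 from rfl, List.range_succ, List.filter_append]
    by_cases h : a.getD (j + 1) 0 ≥ v
    · have e : List.filter (fun t => decide (a.getD t 0 < v)) [j + 1] = [] := by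
        simp only [List.filter_cons, List.filter_nil, decide_eq_false (not_lt.mpr h),
          Bool.false_eq_true]
        exact if_neg not_false
      rw [e, List.append_nil]
      simp only [pvScanL, if_pos h]
      exact ih
    · have e : List.filter (fun t => decide (a.getD t 0 < v)) [j + 1] = [j + 1] := by
        simp only [List.filter_cons, List.filter_nil, decide_eq_true (lt_of_not_ge h)]
        exact if_pos trivial
      rw [e, List.getLast?_concat]
      simp only [pvScanL, if_neg h]
      rfl

theorem pvScanR_eq (a : List Int) (v : Int) : ∀ m k, a.length - k = m → k ≤ a.length →
    pvScanR a v k = ((List.range' k (a.length - k)).find? (fun t => decide (a.getD t 0 ≤ v))).getD a.length := by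
  intro m
  induction m with
  | zero =>
    intro k hk hk2
    unfold pvScanR
    rw [if_neg (show ¬ k < a.length by omega), hk, List.range'_zero]
    simp only [List.find?_nil, Option.getD_none]
    omega
  | succ m ih =>
    intro k hk hk2
    have hklt : k < a.length := by omega
    unfold pvScanR
    rw [if_pos hklt, hk, List.range'_succ]
    by_cases h : a.getD k 0 > v
    · rw [if_pos h, List.find?_cons_of_neg (p := fun t => decide (a.getD t 0 ≤ v))
        (by intro hc; exact (not_le.mpr h) (of_decide_eq_true hc))]
      rw [ih (k + 1) (by omega) (by omega), show a.length - (k + 1) = m by omega]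
    · rw [if_neg h, List.find?_cons_of_pos (p := fun t => decide (a.getD t 0 ≤ v))
        (decide_eq_true (le_of_not_gt h))]
      rfl

theorem pvSx_append (xs : List Int) (x : Int) : ∀ k, k ≤ xs.length → pvSx (xs ++ [x]) k = pvSx xs k := by
  intro k
  induction k with
  | zero => intro _; rfl
  | succ k ih =>
    intro hk
    simp only [pvSx]
    rw [ih (by omega), List.getD_append _ _ _ _ (by omega)]

theorem pvSSx_append (xs : List Int) (x : Int) : ∀ k, k ≤ xs.length + 1 → pvSSx (xs ++ [x]) k = pvSSx xs k := by
  intro k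
  induction k with
  | zero => intro _; rfl
  | succ k ih =>
    intro hk
    simp only [pvSSx]
    rw [ih (by omega), pvSx_append _ _ _ (by omega)]

theorem pvSSBInv (a : List Int) :
    a.foldl (fun (p : List Int × Int) v =>
      let acc := p.2 + v
      (p.1 ++ [p.1.getLastD 0 + acc], acc)) ([0, 0], 0) =
      ((List.range (a.length + 2)).map (pvSSx a), pvSx a a.length) := by
  induction a using List.reverseRecOn with
  | nil => rfl
  | append_singleton xs x ih =>
    rw [List.foldl_append, ih]
    simp only [List.foldl_cons, List.foldl_nil]
    have hlen : (xs ++ [x]).length = xs.length + 1 := by simp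
    have hSx : pvSx (xs ++ [x]) (xs.length + 1) = pvSx xs xs.length + x := by
      simp only [pvSx]
      rw [pvSx_append _ _ _ le_rfl, List.getD_eq_getElem _ _ (by simp),
        List.getElem_concat_length rfl]
    have hlast : ((List.range (xs.length + 2)).map (pvSSx xs)).getLastD 0 =
        pvSSx xs (xs.length + 1) := by
      rw [show xs.length + 2 = (xs.length + 1) + 1 from rfl, List.range_succ, List.map_append]
      exact List.getLastD_concat
    rw [hlast, hlen]
    simp only [Prod.mk.injEq]
    constructor
    · have hmap : (List.range (xs.length + 2)).map (pvSSx (xs ++ [x])) =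
          (List.range (xs.length + 2)).map (pvSSx xs) :=
        List.map_congr_left (fun k hk =>
          pvSSx_append xs x k (by have := List.mem_range.mp hk; omega))
      have hval : pvSSx (xs ++ [x]) (xs.length + 2) =
          pvSSx xs (xs.length + 1) + (pvSx xs xs.length + x) := by
        rw [show xs.length + 2 = (xs.length + 1) + 1 from rfl]
        simp only [pvSSx]
        rw [pvSSx_append _ _ _ (by omega), pvSx_append _ _ _ (by omega), hSx]
      conv_rhs => rw [show xs.length + 1 + 2 = (xs.length + 2) + 1 from rfl, List.range_succ,
        List.map_append, hmap]
      simp only [List.map_cons, List.map_nil]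
      rw [hval]
    · exact hSx.symm

-- congruences ----------------------------------------------------------------

theorem pvSm_eq (a : List Int) : ∀ k, pvSm a k = pvSx a k % pvM := by
  intro k
  induction k with
  | zero => simp [pvSm, pvSx]
  | succ k ih =>
    show PySem.Int.mod (pvSm a k + a.getD k 0) pvM = (pvSx a k + a.getD k 0) % pvM
    rw [PySem.Int.mod_eq_emod_of_pos pvM_pos, ih, Int.emod_add_emod]

theorem pvSSm_eq (a : List Int) : ∀ k, pvSSm a k = pvSSx a k % pvM := by
  intro k
  induction k with
  | zero => simp [pvSSm, pvSSx]
  | succ k ih =>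
    show PySem.Int.mod (pvSSm a k + pvSm a k) pvM = (pvSSx a k + pvSx a k) % pvM
    rw [PySem.Int.mod_eq_emod_of_pos pvM_pos, ih, pvSm_eq, ← Int.add_emod]

-- bounds ---------------------------------------------------------------------

theorem pvSpecL_bounds (a : List Int) (i : Nat) : -1 ≤ pvSpecL a i ∧ pvSpecL a i < (i : Int) := by
  unfold pvSpecL pvSpecLL
  rcases h : ((List.range i).filter (fun j => decide (a.getD j 0 < a.getD i 0))).getLast? with _ | j
  · simp only [Option.map_none, Option.getD_none]
    omega
  · have hj : j < i := List.mem_range.mp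
      ((List.mem_filter.mp (List.mem_of_getLast? h)).1)
    simp only [Option.map_some, Option.getD_some]
    constructor
    · exact le_trans (by omega) (Int.natCast_nonneg j)
    · exact Int.ofNat_lt.mpr hj

theorem pvSpecR_bounds (a : List Int) (i : Nat) (hi : i < a.length) :
    i < pvSpecR a i ∧ pvSpecR a i ≤ a.length := by
  unfold pvSpecR
  rcases h : (List.range' (i + 1) (a.length - (i + 1))).find?
      (fun k => decide (a.getD k 0 ≤ a.getD i 0)) with _ | j
  · simp only [Option.getD_none]
    omega
  · have hj := List.mem_range'_1.mp (List.mem_of_find?_eq_some h)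
    simp only [Option.getD_some]
    omega

-- evaluations of the two ports ----------------------------------------------

theorem pvA_eval (a : List Int) : totalStrength a =
    PySem.Int.mod (((List.range a.length).map
      (fun i => PySem.Int.mod (pvE a (pvSSm a) i) pvM * a.getD i 0)).sum) pvM := by
  have hM : ((10 : Int) ^ 9 + 7) = pvM := rfl
  have hR0 : (PySem.List.pyRange ((a.length : Int) - 1) (-1) (-1)).foldl
      (fun (p : List Int × List Nat) ii =>
        let i := ii.toNat
        let v := a.getD i 0
        let st := pvPopGt a v p.2
        let right := st.head?.elim p.1 (fun j => p.1.set i (Int.ofNat j))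
        (right, i :: st)) (List.replicate a.length (a.length : Int), []) =
      (pvRightArr a 0, pvStkR a 0) := by
    have h1 : PySem.List.pyRange ((a.length : Int) - 1) (-1) (-1) =
        ((List.range a.length).map (fun k => ((k : Nat) : Int))).reverse := by
      rw [PySem.List.pyRange_neg_one_eq_reverse]
      congr 1
      rw [show (-1 : Int) + 1 = 0 from rfl, show ((a.length : Int) - 1) + 1 = (a.length : Int) by ring,
        PySem.List.pyRange_one]
      simp [Int.toNat_natCast]
    rw [h1, ← List.map_reverse, List.foldl_map]
    simp only [Int.toNat_natCast]
    have h2 : (List.range a.length).reverse = (List.range' (a.length - a.length) a.length).reverse := by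
      rw [Nat.sub_self, ← List.range_eq_range']
    rw [h2, pvRightInv a a.length le_rfl, Nat.sub_self]
  simp only [totalStrength, hM]
  simp only [pvLeftInv a a.length le_rfl, hR0, pvSInv a a.length le_rfl]
  have hSfull : (List.range (a.length + 1)).map (fun k => if k ≤ a.length then pvSm a k else 0) =
      (List.range (a.length + 1)).map (pvSm a) :=
    List.map_congr_left (fun k hk => if_pos (by have := List.mem_range.mp hk; omega))
  simp only [hSfull]
  have hSS1 : (List.range (a.length + 1)).foldl
      (fun (ss : List Int) i =>
        ss.set (i + 1) (PySem.Int.mod (ss.getD i 0 + ((List.range (a.length + 1)).map (pvSm a)).getD i 0) pvM))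
      (List.replicate (a.length + 2) 0) =
      (List.range (a.length + 1)).foldl
      (fun (ss : List Int) i =>
        ss.set (i + 1) (PySem.Int.mod (ss.getD i 0 + pvSm a i) pvM))
      (List.replicate (a.length + 2) 0) :=
    PySem.List.foldl_congr_mem _ _ _ _ (fun acc x hx => by
      rw [PySem.List.getD_map_range _ _ _ _ (List.mem_range.mp hx)])
  simp only [hSS1, pvSSInv a (a.length + 1) le_rfl]
  have hSSfull : (List.range (a.length + 2)).map (fun k => if k ≤ a.length + 1 then pvSSm a k else 0) =
      (List.range (a.length + 2)).map (pvSSm a) :=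
    List.map_congr_left (fun k hk => if_pos (by have := List.mem_range.mp hk; omega))
  simp only [hSSfull]
  have hLa : ∀ i, i < a.length → (pvLeftArr a a.length).getD i 0 = pvSpecL a i := fun i hi => by
    unfold pvLeftArr
    rw [PySem.List.getD_map_range _ _ _ _ hi, if_pos hi]
  have hRa : ∀ i, i < a.length → (pvRightArr a 0).getD i 0 = ((pvSpecR a i : Nat) : Int) :=
    fun i hi => by
      unfold pvRightArr
      rw [PySem.List.getD_map_range _ _ _ _ hi, if_pos (Nat.zero_le i)]
  refine Eq.trans (PySem.List.foldl_congr_mem _ _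
    (fun ans i => PySem.Int.mod (ans + PySem.Int.mod (pvE a (pvSSm a) i) pvM * a.getD i 0) pvM)
    0 ?_) ?_
  · intro ans i hi
    have hin := List.mem_range.mp hi
    have hsr := pvSpecR_bounds a i hin
    have hsl := pvSpecL_bounds a i
    rw [hLa i hin, hRa i hin,
      PySem.List.getD_map_range _ _ _ _
        (show ((pvSpecR a i : Int) - 1 + 2).toNat < a.length + 2 by omega),
      PySem.List.getD_map_range _ _ _ _ (show i + 1 < a.length + 2 by omega),
      PySem.List.getD_map_range _ _ _ _
        (show (pvSpecL a i + 1).toNat < a.length + 2 by omega)]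
    rfl
  · exact pvFoldlMod _ _

theorem pvB_eval (a : List Int) : totalStrength_alt a =
    PySem.Int.mod (((List.range a.length).map
      (fun i => a.getD i 0 * pvE a (pvSSx a) i)).sum) pvM := by
  have hM : ((10 : Int) ^ 9 + 7) = pvM := rfl
  simp only [totalStrength_alt, hM]
  simp only [pvSSBInv a]
  congr 1
  refine Eq.trans (PySem.List.foldl_congr_mem _ _
    (fun total i => total + a.getD i 0 * pvE a (pvSSx a) i) 0 ?_) ?_
  · intro total i hi
    have hin := List.mem_range.mp hi
    have hsr := pvSpecR_bounds a i hin
    have hsl := pvSpecL_bounds a i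
    have hL : (if i = 0 then (-1 : Int) else pvScanL a (a.getD i 0) (i - 1)) = pvSpecL a i := by
      rcases Nat.eq_zero_or_pos i with h0 | h0
      · subst h0
        rfl
      · rw [if_neg (by omega), pvScanL_eq a _ (i - 1), show i - 1 + 1 = i by omega]
        rfl
    have hR : pvScanR a (a.getD i 0) (i + 1) = pvSpecR a i := by
      rw [pvScanR_eq a _ (a.length - (i + 1)) (i + 1) rfl (by omega)]
      rfl
    rw [hL, hR,
      PySem.List.getD_map_range _ _ _ _
        (show ((pvSpecR a i : Int) - 1 + 2).toNat < a.length + 2 by omega),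
      PySem.List.getD_map_range _ _ _ _ (show i + 1 < a.length + 2 by omega),
      PySem.List.getD_map_range _ _ _ _
        (show (pvSpecL a i + 1).toNat < a.length + 2 by omega)]
    rfl
  · rw [PySem.List.foldl_add, zero_add]

-- ===== VERDICT (by name: the statement is the Claim_ definition above) =====
theorem totalStrength_spec : Claim_equal_totalStrength := by
  intro a _
  show totalStrength a = totalStrength_alt a
  rw [pvA_eval, pvB_eval, PySem.Int.mod_eq_emod_of_pos pvM_pos, PySem.Int.mod_eq_emod_of_pos pvM_pos]
  apply pvSumModEq
  intro i _
  have hE : pvE a (pvSSm a) i ≡ pvE a (pvSSx a) i [ZMOD pvM] := by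
    have h : ∀ k, pvSSm a k ≡ pvSSx a k [ZMOD pvM] := by
      intro k
      rw [pvSSm_eq]
      exact Int.emod_emod_of_dvd _ dvd_rfl
    unfold pvE
    exact ((h _).sub (h _)).mul_left _ |>.sub (((h _).sub (h _)).mul_left _)
  have hmm : pvE a (pvSSm a) i % pvM ≡ pvE a (pvSSm a) i [ZMOD pvM] :=
    Int.emod_emod_of_dvd _ dvd_rfl
  calc PySem.Int.mod (pvE a (pvSSm a) i) pvM * a.getD i 0
      ≡ pvE a (pvSSm a) i * a.getD i 0 [ZMOD pvM] := by
        rw [PySem.Int.mod_eq_emod_of_pos pvM_pos]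
        exact hmm.mul_right _
    _ ≡ pvE a (pvSSx a) i * a.getD i 0 [ZMOD pvM] := hE.mul_right _
    _ = a.getD i 0 * pvE a (pvSSx a) i := mul_comm _ _
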